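-- pv_equiv track=rewrite | github.com/Konner-Yi/Konner-Yi | fe_op_counting3.py | generate_n_by_n_matrix
-- ===== SOURCE A (Python) =====
-- def generate_n_by_n_matrix(n):
--     result = []
--     for r in range(n):
--         row = []
--         for c in range(n):
--             row.append(r * n + c)
--         result.append(row)
--     return result
-- ===== SOURCE B (Python) =====
-- def generate_n_by_n_matrix(n):
--     if n <= 0:
--         return []
--     flat = list(range(n * n))
--     result = []
--     for i in range(n):
--         result.append(flat[i * n:(i + 1) * n])
--     return result
-- ===== Notes on version B (the rewrite author's own statement) =====
-- stated objective: alternative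
-- what changed: B builds the flat row-major sequence list(range(n*n)) once and reshapes it into rows by slicing, instead of computing each cell as r*n+c in nested loops.
import Mathlib
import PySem

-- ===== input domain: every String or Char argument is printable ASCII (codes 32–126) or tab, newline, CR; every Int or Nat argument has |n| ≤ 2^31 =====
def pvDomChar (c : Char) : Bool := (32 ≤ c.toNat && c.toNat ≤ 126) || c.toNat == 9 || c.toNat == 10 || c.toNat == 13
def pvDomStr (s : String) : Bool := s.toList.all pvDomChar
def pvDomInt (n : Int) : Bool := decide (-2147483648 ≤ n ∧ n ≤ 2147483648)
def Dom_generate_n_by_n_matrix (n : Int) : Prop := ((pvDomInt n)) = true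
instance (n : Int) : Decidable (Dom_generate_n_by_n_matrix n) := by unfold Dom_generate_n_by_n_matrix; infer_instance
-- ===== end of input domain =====

-- B builds the flat row-major sequence list(range(n*n)) once and reshapes it into rows by
-- slicing, instead of computing each cell as r*n+c in nested loops (alternative decomposition).


-- ===== PORT A =====
def generate_n_by_n_matrix (n : Int) : List (List Int) :=
  (PySem.List.pyRange 0 n 1).foldl
    (fun result r =>
      let row := (PySem.List.pyRange 0 n 1).foldl (fun row c => row ++ [r * n + c]) []
      result ++ [row])
    []

-- ===== PORT B =====
def generate_n_by_n_matrix_alt (n : Int) : List (List Int) :=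
  if n ≤ 0 then []
  else
  let flat := PySem.List.pyRange 0 (n * n) 1
  (PySem.List.pyRange 0 n 1).foldl
    (fun result i => result ++ [PySem.List.slice flat (some (i * n)) (some ((i + 1) * n))])
    []

-- ===== PRECONDITION & SPEC =====
def Spec_generate_n_by_n_matrix (n : Int) (out : List (List Int)) : Prop := out = generate_n_by_n_matrix_alt n
instance (n : Int) (out : List (List Int)) : Decidable (Spec_generate_n_by_n_matrix n out) := by unfold Spec_generate_n_by_n_matrix; infer_instance

-- ===== CLAIM (what is proved, stated in full; the proofs are below) =====
def Claim_equal_generate_n_by_n_matrix : Prop := ∀ (n : Int), Dom_generate_n_by_n_matrix n → Spec_generate_n_by_n_matrix n (generate_n_by_n_matrix n)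

-- ===== LEMMAS AND PROOFS =====

-- foldl that appends one element per step is a map
theorem foldl_append_singleton {α β : Type} (f : α → β) (l : List α) (init : List β) :
    l.foldl (fun acc x => acc ++ [f x]) init = init ++ l.map f := by
  induction l generalizing init with
  | nil => simp
  | cons x xs ih => simp [List.foldl, ih]

-- a slice of range(0, m) with 0 ≤ a ≤ b ≤ m is range(a, b)
theorem slice_pyRange (m a b : Int) (ha : 0 ≤ a) (hab : a ≤ b) (hbm : b ≤ m) :
    PySem.List.slice (PySem.List.pyRange 0 m 1) (some a) (some b) = PySem.List.pyRange a b 1 := by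
  rw [PySem.List.slice_toNat _ ha (le_trans ha hab)]
  rw [PySem.List.pyRange_one_append 0 a m ha (le_trans hab hbm)]
  rw [PySem.List.pyRange_one_append a b m hab hbm]
  rw [List.drop_append_of_le_length (by simp [PySem.List.length_pyRange_one])]
  rw [List.drop_of_length_le (by simp [PySem.List.length_pyRange_one]), List.nil_append]
  rw [List.take_append_of_le_length (by simp [PySem.List.length_pyRange_one]; omega)]
  rw [List.take_of_length_le (by simp [PySem.List.length_pyRange_one]; omega)]

-- an inner row of A equals range(r*n, (r+1)*n)
theorem rowA_eq (n r : Int) :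
    (PySem.List.pyRange 0 n 1).foldl (fun row c => row ++ [r * n + c]) [] =
      PySem.List.pyRange (r * n) ((r + 1) * n) 1 := by
  rw [foldl_append_singleton, List.nil_append]
  rw [PySem.List.pyRange_one (r * n) ((r + 1) * n), PySem.List.pyRange_one 0 n]
  rw [List.map_map]
  have h : (r + 1) * n - r * n = n - 0 := by ring
  rw [h]
  apply List.map_congr_left
  intro k _
  simp

theorem generate_n_by_n_matrix_eq_alt (n : Int) :
    generate_n_by_n_matrix n = generate_n_by_n_matrix_alt n := by
  unfold generate_n_by_n_matrix generate_n_by_n_matrix_alt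
  by_cases hn : n ≤ 0
  · simp [hn, PySem.List.pyRange_one_eq_nil hn]
  rw [if_neg hn]
  rw [foldl_append_singleton (fun r => (PySem.List.pyRange 0 n 1).foldl (fun row c => row ++ [r * n + c]) []),
      foldl_append_singleton (fun i => PySem.List.slice (PySem.List.pyRange 0 (n * n) 1) (some (i * n)) (some ((i + 1) * n)))]
  apply congrArg
  apply List.map_congr_left
  intro r hr
  rw [PySem.List.mem_pyRange_one] at hr
  rw [rowA_eq, slice_pyRange]
  · exact mul_nonneg hr.1 (le_trans hr.1 (le_of_lt hr.2))
  · nlinarith [hr.1, hr.2]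
  · nlinarith [hr.1, hr.2]

-- ===== VERDICT (by name: the statement is the Claim_ definition above) =====
theorem generate_n_by_n_matrix_spec : Claim_equal_generate_n_by_n_matrix := by
  intro n _
  exact generate_n_by_n_matrix_eq_alt n
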